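-- pv_equiv track=rewrite | github.com/sonambharti/Python | Graph/DFS/CircleOfStr.py | canBeChained
-- ===== SOURCE A (Python) =====
-- from collections import defaultdict
--
-- def canBeChained(arr):
--     # Step 1: Build graph and in-degree, out-degree maps
--     graph = defaultdict(list)
--     in_degree = defaultdict(int)
--     out_degree = defaultdict(int)
--
--     # Step 2: Populate the graph and degree counts
--     for word in arr:
--         start = word[0]
--         end = word[-1]
--         graph[start].append(end)
--         out_degree[start] += 1
--         in_degree[end] += 1
--
--     # Step 3: Check if in-degree matches out-degree for each node
--     for char in set(in_degree.keys()).union(out_degree.keys()):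
--         if in_degree[char] != out_degree[char]:
--             return 0
--
--     # Step 4: DFS to check if the graph is strongly connected
--     def dfs(node, visited):
--         visited.add(node)
--         for neighbor in graph[node]:
--             if neighbor not in visited:
--                 dfs(neighbor, visited)
--
--     # Find a starting node with out-degree > 0
--     start_node = arr[0][0]
--
--     # Step 5: Check if all nodes are reachable using DFS
--     visited = set()
--     dfs(start_node, visited)
--
--     # Collect all characters that have either in-degree or out-degree > 0
--     all_chars_involved = set(in_degree.keys()).union(out_degree.keys())
--
--     return 1 if visited == all_chars_involved else 0
-- ===== SOURCE B (Python) =====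
-- from collections import Counter
--
-- def canBeChained(arr):
--     # Edge list: one (first-char, last-char) pair per word.
--     edges = [(w[0], w[-1]) for w in arr]
--     out_c = Counter(s for s, _ in edges)
--     in_c = Counter(e for _, e in edges)
--     # Degree balance: in-degree == out-degree for every character.
--     if in_c != out_c:
--         return 0
--     # Forward reachability from the first word's first character,
--     # by saturating over the edge list until no new node is added.
--     visited = {edges[0][0]}
--     changed = True
--     while changed:
--         changed = False
--         for s, e in edges:
--             if s in visited and e not in visited:
--                 visited.add(e)
--                 changed = True
--     chars = set(in_c) | set(out_c)
--     return 1 if visited == chars else 0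
-- ===== Notes on version B (the rewrite author's own statement) =====
-- stated objective: alternative
-- what changed: Replaces the adjacency-dict plus recursive DFS with a plain edge list saturated to a reachability fixpoint (repeated relaxation passes), and replaces the per-character degree loop with a single Counter equality test; Pre_ excludes the inputs (empty list, or a word that is the empty string) on which A raises IndexError.
import Mathlib
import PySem

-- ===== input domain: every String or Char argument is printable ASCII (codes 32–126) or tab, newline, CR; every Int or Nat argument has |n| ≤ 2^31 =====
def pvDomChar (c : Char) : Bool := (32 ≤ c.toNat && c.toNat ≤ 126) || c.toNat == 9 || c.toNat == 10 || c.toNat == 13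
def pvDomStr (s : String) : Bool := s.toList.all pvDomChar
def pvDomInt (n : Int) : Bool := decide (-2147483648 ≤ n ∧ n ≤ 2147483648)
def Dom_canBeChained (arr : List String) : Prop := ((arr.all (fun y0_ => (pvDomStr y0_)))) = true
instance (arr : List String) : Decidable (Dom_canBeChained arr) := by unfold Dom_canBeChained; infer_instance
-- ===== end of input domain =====

-- B replaces A's recursive DFS over an adjacency dict by fixpoint saturation over the edge
-- list, and A's per-character degree loop by a Counter equality; same return value on Pre_.

-- word[0] / word[-1]; total forms, exact for nonempty words (Pre_ guarantees that)
def pvFirst (w : String) : Char := PySem.List.pyGetD w.toList 0 ' '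
def pvLast (w : String) : Char := PySem.List.pyGetD w.toList (-1) ' '

-- ===== PORT A =====
-- recursive dfs(node, visited) of A; fuel only makes the recursion total (A's dfs always
-- terminates: a node is explored only when unvisited); fuel-0 branch is never reached
-- when called with fuel > number of unvisited graph characters.
def pvDfsA (g : PySem.Dict Char (List Char)) : Nat → Char → PySem.Set Char → PySem.Set Char
  | 0, node, visited => PySem.Set.add visited node
  | f + 1, node, visited =>
      (PySem.Dict.getD g node []).foldl
        (fun v nb => if PySem.Set.contains v nb then v else pvDfsA g f nb v)
        (PySem.Set.add visited node)

def canBeChained (arr : List String) : Int :=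
  let st := arr.foldl
    (fun (s : PySem.Dict Char (List Char) × PySem.Dict Char Int × PySem.Dict Char Int) word =>
      (PySem.Dict.modify s.1 (pvFirst word) [] (· ++ [pvLast word]),
       PySem.Dict.modify s.2.1 (pvFirst word) 0 (· + 1),
       PySem.Dict.modify s.2.2 (pvLast word) 0 (· + 1)))
    (PySem.Dict.empty, PySem.Dict.empty, PySem.Dict.empty)
  let graph := st.1
  let outDeg := st.2.1
  let inDeg := st.2.2
  let allChars := PySem.Set.union (PySem.Set.ofList (PySem.Dict.keys inDeg)) (PySem.Dict.keys outDeg)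
  if allChars.any (fun c => !(PySem.Dict.getD inDeg c 0 == PySem.Dict.getD outDeg c 0)) then 0
  else
    let start := pvFirst (PySem.List.pyGetD arr 0 "")   -- arr[0][0]; exact under Pre_
    let visited := pvDfsA graph ((PySem.Dict.keys graph ++ (PySem.Dict.values graph).flatten).length + 1) start PySem.Set.empty
    if PySem.Set.equal visited allChars then 1 else 0

-- ===== PORT B =====
-- one 'for s, e in edges' relaxation pass: (visited, changed)
def pvPass (edges : List (Char × Char)) (visited : PySem.Set Char) : PySem.Set Char × Bool :=
  edges.foldl
    (fun st e =>
      if PySem.Set.contains st.1 e.1 && !(PySem.Set.contains st.1 e.2)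
      then (PySem.Set.add st.1 e.2, true) else st)
    (visited, false)

-- the 'while changed' loop; fuel only makes it total (each continuing pass adds a character)
def pvSat (edges : List (Char × Char)) : Nat → PySem.Set Char → PySem.Set Char
  | 0, visited => visited
  | f + 1, visited =>
      let p := pvPass edges visited
      if p.2 then pvSat edges f p.1 else p.1

-- Python dict/Counter equality: same keys (as a set) and same count per key
def pvDictEqInt (d e : PySem.Dict Char Int) : Bool :=
  PySem.Set.equal (PySem.Dict.keys d) (PySem.Dict.keys e) &&
  (PySem.Dict.keys d).all (fun k => PySem.Dict.getD d k 0 == PySem.Dict.getD e k 0)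

def canBeChained_alt (arr : List String) : Int :=
  let edges := arr.map (fun w => (pvFirst w, pvLast w))
  let outC := PySem.Dict.counter (edges.map (·.1))
  let inC := PySem.Dict.counter (edges.map (·.2))
  if !(pvDictEqInt inC outC) then 0
  else
    let s0 := (PySem.List.pyGetD edges 0 (' ', ' ')).1   -- edges[0][0]; exact under Pre_
    let visited := pvSat edges ((edges.map (·.1) ++ edges.map (·.2)).length + 1)
                     (PySem.Set.add PySem.Set.empty s0)
    let chars := PySem.Set.union (PySem.Set.ofList (PySem.Dict.keys inC)) (PySem.Dict.keys outC)
    if PySem.Set.equal visited chars then 1 else 0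

-- ===== PRECONDITION & SPEC =====
-- Pre_ excludes exactly the inputs where A raises IndexError: the empty list (arr[0]) and
-- lists containing an empty word (word[0]).
def Pre_canBeChained (arr : List String) : Prop := arr ≠ [] ∧ ∀ w ∈ arr, w ≠ ""
instance (arr : List String) : Decidable (Pre_canBeChained arr) := by unfold Pre_canBeChained; infer_instance
def pvWitness_canBeChained : List String := ["ab", "ba"]

def Spec_canBeChained (arr : List String) (out : Int) : Prop := out = canBeChained_alt arr
instance (arr : List String) (out : Int) : Decidable (Spec_canBeChained arr out) := by unfold Spec_canBeChained; infer_instance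

-- ===== CLAIM (what is proved, stated in full; the proofs are below) =====
def Claim_equal_canBeChained : Prop := ∀ (arr : List String), Dom_canBeChained arr → Pre_canBeChained arr → Spec_canBeChained arr (canBeChained arr)

-- ===== LEMMAS AND PROOFS =====

-- proof-only helpers
def pvEdges (arr : List String) : List (Char × Char) := arr.map (fun w => (pvFirst w, pvLast w))

def pvGraphOf (arr : List String) : PySem.Dict Char (List Char) :=
  (pvEdges arr).foldl (fun d p => PySem.Dict.modify d p.1 [] (· ++ [p.2])) PySem.Dict.empty

def pvAdj (g : PySem.Dict Char (List Char)) (n : Char) : List Char := PySem.Dict.getD g n []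

def pvUniv (g : PySem.Dict Char (List Char)) : List Char :=
  PySem.Dict.keys g ++ (PySem.Dict.values g).flatten

def pvUnivB (E : List (Char × Char)) : List Char := E.map (·.1) ++ E.map (·.2)

def pvLeft (univ : List Char) (vis : PySem.Set Char) : Nat :=
  (univ.filter (fun c => !(PySem.Set.contains vis c))).length

def pvReach (E : List (Char × Char)) (a b : Char) : Prop :=
  Relation.ReflTransGen (fun x y => (x, y) ∈ E) a b

def pvReachAdj (g : PySem.Dict Char (List Char)) (a b : Char) : Prop :=
  Relation.ReflTransGen (fun x y => y ∈ pvAdj g x) a b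

lemma pvMemAdd {s : PySem.Set Char} {x y : Char} :
    y ∈ PySem.Set.add s x ↔ y ∈ s ∨ y = x := PySem.Set.mem_add s x y

lemma pvContains {s : PySem.Set Char} {x : Char} :
    PySem.Set.contains s x = true ↔ x ∈ s := PySem.Set.contains_iff s x

lemma pvNotContains {s : PySem.Set Char} {x : Char} :
    PySem.Set.contains s x = false ↔ x ∉ s := by
  rw [← Bool.not_eq_true, not_iff_not]; exact pvContains

-- measure lemmas
lemma pvLeft_mono (univ : List Char) {v w : PySem.Set Char} (h : v ⊆ w) :
    pvLeft univ w ≤ pvLeft univ v := by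
  unfold pvLeft
  rw [← List.countP_eq_length_filter, ← List.countP_eq_length_filter]
  apply List.countP_mono_left
  intro a _ ha
  simp only [Bool.not_eq_eq_eq_not, Bool.not_true, pvNotContains] at *
  exact fun hav => ha (h hav)

lemma pvLeft_strict (univ : List Char) {v w : PySem.Set Char} (h : v ⊆ w)
    {n : Char} (hn : n ∈ univ) (hw : n ∈ w) (hv : n ∉ v) :
    pvLeft univ w < pvLeft univ v := by
  induction univ with
  | nil => cases hn
  | cons a u ih =>
    by_cases hav : a ∈ v
    · have haw : a ∈ w := h hav
      have e1 : pvLeft (a :: u) w = pvLeft u w := by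
        unfold pvLeft; rw [List.filter_cons, if_neg (by simp [haw])]
      have e2 : pvLeft (a :: u) v = pvLeft u v := by
        unfold pvLeft; rw [List.filter_cons, if_neg (by simp [hav])]
      rw [e1, e2]
      rcases List.mem_cons.mp hn with rfl | hn'
      · exact absurd hav hv
      · exact ih hn'
    · have e2 : pvLeft (a :: u) v = pvLeft u v + 1 := by
        unfold pvLeft; rw [List.filter_cons, if_pos (by simp [hav])]; rfl
      by_cases haw : a ∈ w
      · have e1 : pvLeft (a :: u) w = pvLeft u w := by
          unfold pvLeft; rw [List.filter_cons, if_neg (by simp [haw])]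
        rw [e1, e2]
        exact Nat.lt_succ_of_le (pvLeft_mono u h)
      · have e1 : pvLeft (a :: u) w = pvLeft u w + 1 := by
          unfold pvLeft; rw [List.filter_cons, if_pos (by simp [haw])]; rfl
        rw [e1, e2]
        have hn' : n ∈ u := by
          rcases List.mem_cons.mp hn with rfl | hn'
          · exact absurd hw haw
          · exact hn'
        exact Nat.succ_lt_succ (ih hn')

lemma pvLeft_le (univ : List Char) (vis : PySem.Set Char) : pvLeft univ vis ≤ univ.length :=
  List.length_filter_le _ _

lemma mem_univ_of_mem_adj {g : PySem.Dict Char (List Char)} {a b : Char}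
    (h : b ∈ pvAdj g a) : b ∈ pvUniv g := by
  unfold pvAdj at h
  rcases hg : PySem.Dict.get? g a with _ | v
  · rw [PySem.Dict.getD_of_get?_eq_none g _ hg] at h; cases h
  · rw [PySem.Dict.getD_of_get?_eq_some g _ hg] at h
    have hv : v ∈ PySem.Dict.values g :=
      List.mem_map.mpr ⟨(a, v), PySem.Dict.mem_items_of_get?_eq_some g hg, rfl⟩
    exact List.mem_append.mpr (Or.inr (List.mem_flatten.mpr ⟨v, hv, h⟩))

-- ===== DFS (port A) characterisation =====
lemma dfs_grow (g : PySem.Dict Char (List Char)) :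
    ∀ (f : Nat) (n : Char) (vis : PySem.Set Char), vis ⊆ pvDfsA g f n vis := by
  intro f
  induction f with
  | zero => intro n vis x hx; exact pvMemAdd.mpr (Or.inl hx)
  | succ f ih =>
    intro n vis
    have hfold : ∀ (l : List Char) (acc : PySem.Set Char),
        acc ⊆ l.foldl (fun v nb => if PySem.Set.contains v nb then v else pvDfsA g f nb v) acc := by
      intro l
      induction l with
      | nil => intro acc; simp
      | cons b t iht =>
        intro acc x hx
        simp only [List.foldl_cons]
        apply iht
        by_cases hb : PySem.Set.contains acc b = true
        · rw [if_pos hb]; exact hx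
        · rw [if_neg hb]; exact ih b acc hx
    intro x hx
    show x ∈ (PySem.Dict.getD g n []).foldl _ (PySem.Set.add vis n)
    exact hfold _ _ (pvMemAdd.mpr (Or.inl hx))

lemma dfs_fold_grow (g : PySem.Dict Char (List Char)) (f : Nat) (l : List Char)
    (acc : PySem.Set Char) :
    acc ⊆ l.foldl (fun v nb => if PySem.Set.contains v nb then v else pvDfsA g f nb v) acc := by
  induction l generalizing acc with
  | nil => simp
  | cons b t iht =>
    intro x hx
    simp only [List.foldl_cons]
    apply iht
    by_cases hb : PySem.Set.contains acc b = true
    · rw [if_pos hb]; exact hx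
    · rw [if_neg hb]; exact dfs_grow g f b acc hx

lemma dfs_self (g : PySem.Dict Char (List Char)) (f : Nat) (n : Char) (vis : PySem.Set Char) :
    n ∈ pvDfsA g f n vis := by
  cases f with
  | zero => exact pvMemAdd.mpr (Or.inr rfl)
  | succ f =>
    show n ∈ (PySem.Dict.getD g n []).foldl _ (PySem.Set.add vis n)
    exact dfs_fold_grow g f _ _ (pvMemAdd.mpr (Or.inr rfl))

lemma dfs_sound (g : PySem.Dict Char (List Char)) :
    ∀ (f : Nat) (n : Char) (vis : PySem.Set Char) (x : Char),
      x ∈ pvDfsA g f n vis → x ∈ vis ∨ pvReachAdj g n x := by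
  intro f
  induction f with
  | zero =>
    intro n vis x hx
    rcases pvMemAdd.mp hx with h | rfl
    · exact Or.inl h
    · exact Or.inr Relation.ReflTransGen.refl
  | succ f ih =>
    intro n vis x hx
    have hfold : ∀ (l : List Char), (∀ p ∈ l, p ∈ pvAdj g n) →
        ∀ (acc : PySem.Set Char), (∀ y ∈ acc, y ∈ vis ∨ pvReachAdj g n y) →
        ∀ y ∈ l.foldl (fun v nb => if PySem.Set.contains v nb then v else pvDfsA g f nb v) acc,
          y ∈ vis ∨ pvReachAdj g n y := by
      intro l
      induction l with
      | nil => intro _ acc hacc y hy; exact hacc y hy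
      | cons b t iht =>
        intro hl acc hacc y hy
        simp only [List.foldl_cons] at hy
        by_cases hb : PySem.Set.contains acc b = true
        · rw [if_pos hb] at hy
          exact iht (fun p hp => hl p (List.mem_cons_of_mem _ hp)) acc hacc y hy
        · rw [if_neg hb] at hy
          refine iht (fun p hp => hl p (List.mem_cons_of_mem _ hp)) _ ?_ y hy
          intro z hz
          rcases ih b acc z hz with h | h
          · exact hacc z h
          · exact Or.inr (Relation.ReflTransGen.head (hl b List.mem_cons_self) h)
    refine hfold (PySem.Dict.getD g n []) (fun p hp => hp) (PySem.Set.add vis n) ?_ x hx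
    intro y hy
    rcases pvMemAdd.mp hy with h | rfl
    · exact Or.inl h
    · exact Or.inr Relation.ReflTransGen.refl

lemma dfs_closed (g : PySem.Dict Char (List Char)) :
    ∀ (f : Nat) (n : Char) (vis : PySem.Set Char),
      n ∈ pvUniv g → n ∉ vis → pvLeft (pvUniv g) vis < f →
      ∀ u ∈ pvDfsA g f n vis, u ∉ vis → ∀ b ∈ pvAdj g u, b ∈ pvDfsA g f n vis := by
  intro f
  induction f with
  | zero => intro n vis _ _ hf; omega
  | succ f ih =>
    intro n vis hn hnv hf
    have hfold : ∀ (l : List Char), (∀ p ∈ l, p ∈ pvAdj g n) →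
        ∀ (acc : PySem.Set Char),
        (∀ x ∈ PySem.Set.add vis n, x ∈ acc) →
        (∀ u ∈ acc, ¬ u ∈ PySem.Set.add vis n → ∀ b ∈ pvAdj g u, b ∈ acc) →
        (∀ u ∈ l.foldl (fun v nb => if PySem.Set.contains v nb then v else pvDfsA g f nb v) acc,
            ¬ u ∈ PySem.Set.add vis n → ∀ b ∈ pvAdj g u,
            b ∈ l.foldl (fun v nb => if PySem.Set.contains v nb then v else pvDfsA g f nb v) acc) ∧
        (∀ nb ∈ l,
            nb ∈ l.foldl (fun v nb => if PySem.Set.contains v nb then v else pvDfsA g f nb v) acc) := by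
      intro l
      induction l with
      | nil =>
        intro _ acc h0 hcl
        exact ⟨fun u hu h1 b hb => hcl u hu h1 b hb, by simp⟩
      | cons b t iht =>
        intro hl acc h0 hcl
        simp only [List.foldl_cons]
        by_cases hb : PySem.Set.contains acc b = true
        · rw [if_pos hb]
          have := iht (fun p hp => hl p (List.mem_cons_of_mem _ hp)) acc h0 hcl
          refine ⟨this.1, ?_⟩
          intro nb hnb
          rcases List.mem_cons.mp hnb with rfl | hnb'
          · exact dfs_fold_grow g f t acc (pvContains.mp hb)
          · exact this.2 nb hnb'
        · rw [if_neg hb]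
          have hbacc : b ∉ acc := fun h => hb (pvContains.mpr h)
          have hbu : b ∈ pvUniv g := mem_univ_of_mem_adj (hl b List.mem_cons_self)
          have hsub : vis ⊆ acc := fun x hx => h0 x (pvMemAdd.mpr (Or.inl hx))
          have hnacc : n ∈ acc := h0 n (pvMemAdd.mpr (Or.inr rfl))
          have hmeas : pvLeft (pvUniv g) acc < f := by
            have := pvLeft_strict (pvUniv g) hsub hn hnacc hnv
            omega
          have hclosed' := ih b acc hbu hbacc hmeas
          have hgrow := dfs_grow g f b acc
          have h0' : ∀ x ∈ PySem.Set.add vis n, x ∈ pvDfsA g f b acc :=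
            fun x hx => hgrow (h0 x hx)
          have hcl' : ∀ u ∈ pvDfsA g f b acc, ¬ u ∈ PySem.Set.add vis n →
              ∀ c ∈ pvAdj g u, c ∈ pvDfsA g f b acc := by
            intro u hu h1 c hc
            by_cases huacc : u ∈ acc
            · exact hgrow (hcl u huacc h1 c hc)
            · exact hclosed' u hu huacc c hc
          have := iht (fun p hp => hl p (List.mem_cons_of_mem _ hp)) _ h0' hcl'
          refine ⟨this.1, ?_⟩
          intro nb hnb
          rcases List.mem_cons.mp hnb with rfl | hnb'
          · exact dfs_fold_grow g f t _ (dfs_self g f nb acc)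
          · exact this.2 nb hnb'
    have hres := hfold (PySem.Dict.getD g n []) (fun p hp => hp) (PySem.Set.add vis n)
      (fun x hx => hx) (fun u hu h1 => absurd hu h1)
    intro u hu hunv b hb
    by_cases hun : u = n
    · subst hun
      exact hres.2 b hb
    · have h1 : ¬ u ∈ PySem.Set.add vis n := by
        intro h
        rcases pvMemAdd.mp h with h' | h'
        · exact hunv h'
        · exact hun h'
      exact hres.1 u hu h1 b hb

-- DFS endpoint characterisation
lemma dfs_char (g : PySem.Dict Char (List Char)) (start : Char)
    (hs : start ∈ pvUniv g) (x : Char) :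
    x ∈ pvDfsA g ((pvUniv g).length + 1) start PySem.Set.empty ↔ pvReachAdj g start x := by
  constructor
  · intro hx
    rcases dfs_sound g _ start PySem.Set.empty x hx with h | h
    · exact absurd h (by simp)
    · exact h
  · have hcl := dfs_closed g ((pvUniv g).length + 1) start PySem.Set.empty hs
      (by simp) (Nat.lt_succ_of_le (pvLeft_le _ _))
    intro h
    induction h with
    | refl => exact dfs_self g _ start PySem.Set.empty
    | tail h1 h2 ih => exact hcl _ ih (by simp) _ h2

-- ===== saturation (port B) characterisation =====
lemma pass_grow (l : List (Char × Char)) :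
    ∀ (v : PySem.Set Char) (b : Bool),
      v ⊆ (l.foldl (fun st e =>
        if PySem.Set.contains st.1 e.1 && !(PySem.Set.contains st.1 e.2)
        then (PySem.Set.add st.1 e.2, true) else st) (v, b)).1 := by
  induction l with
  | nil => intro v b x hx; exact hx
  | cons e t iht =>
    intro v b x hx
    simp only [List.foldl_cons]
    by_cases hg : (PySem.Set.contains v e.1 && !(PySem.Set.contains v e.2)) = true
    · rw [if_pos hg]; exact iht _ _ (pvMemAdd.mpr (Or.inl hx))
    · rw [if_neg hg]; exact iht _ _ hx

lemma pass_flag (l : List (Char × Char)) :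
    ∀ (v : PySem.Set Char),
      (l.foldl (fun st e =>
        if PySem.Set.contains st.1 e.1 && !(PySem.Set.contains st.1 e.2)
        then (PySem.Set.add st.1 e.2, true) else st) (v, true)).2 = true := by
  induction l with
  | nil => intro v; rfl
  | cons e t iht =>
    intro v
    simp only [List.foldl_cons]
    by_cases hg : (PySem.Set.contains v e.1 && !(PySem.Set.contains v e.2)) = true
    · rw [if_pos hg]; exact iht _
    · rw [if_neg hg]; exact iht _

lemma pass_false (l : List (Char × Char)) :
    ∀ (v : PySem.Set Char) (b : Bool),
      (l.foldl (fun st e =>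
        if PySem.Set.contains st.1 e.1 && !(PySem.Set.contains st.1 e.2)
        then (PySem.Set.add st.1 e.2, true) else st) (v, b)).2 = false →
      (l.foldl (fun st e =>
        if PySem.Set.contains st.1 e.1 && !(PySem.Set.contains st.1 e.2)
        then (PySem.Set.add st.1 e.2, true) else st) (v, b)).1 = v ∧
      b = false ∧ ∀ p ∈ l, p.1 ∈ v → p.2 ∈ v := by
  induction l with
  | nil => intro v b h; exact ⟨rfl, h, by simp⟩
  | cons e t iht =>
    intro v b h
    simp only [List.foldl_cons] at h ⊢
    by_cases hg : (PySem.Set.contains v e.1 && !(PySem.Set.contains v e.2)) = true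
    · rw [if_pos hg] at h
      rw [pass_flag t _] at h
      cases h
    · rw [if_neg hg] at h ⊢
      obtain ⟨h1, h2, h3⟩ := iht v b h
      refine ⟨h1, h2, ?_⟩
      intro p hp hp1
      rcases List.mem_cons.mp hp with rfl | hp'
      · by_contra hp2
        exact hg (by simp [hp1, hp2])
      · exact h3 p hp' hp1

lemma pass_progress (l : List (Char × Char)) :
    ∀ (v : PySem.Set Char),
      (l.foldl (fun st e =>
        if PySem.Set.contains st.1 e.1 && !(PySem.Set.contains st.1 e.2)
        then (PySem.Set.add st.1 e.2, true) else st) (v, false)).2 = true →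
      ∃ p ∈ l, p.2 ∉ v ∧ p.2 ∈ (l.foldl (fun st e =>
        if PySem.Set.contains st.1 e.1 && !(PySem.Set.contains st.1 e.2)
        then (PySem.Set.add st.1 e.2, true) else st) (v, false)).1 := by
  induction l with
  | nil => intro v h; cases h
  | cons e t iht =>
    intro v h
    simp only [List.foldl_cons] at h ⊢
    by_cases hg : (PySem.Set.contains v e.1 && !(PySem.Set.contains v e.2)) = true
    · rw [if_pos hg] at h ⊢
      refine ⟨e, List.mem_cons_self, ?_, ?_⟩
      · have := (Bool.and_eq_true _ _).mp hg
        exact pvNotContains.mp (by simpa using this.2)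
      · exact pass_grow t _ _ (pvMemAdd.mpr (Or.inr rfl))
    · rw [if_neg hg] at h ⊢
      obtain ⟨p, hp, h1, h2⟩ := iht v h
      exact ⟨p, List.mem_cons_of_mem _ hp, h1, h2⟩

lemma pass_sound (P : Char → Prop) (l : List (Char × Char))
    (hcl : ∀ p ∈ l, P p.1 → P p.2) :
    ∀ (v : PySem.Set Char) (b : Bool), (∀ x ∈ v, P x) →
      ∀ x ∈ (l.foldl (fun st e =>
        if PySem.Set.contains st.1 e.1 && !(PySem.Set.contains st.1 e.2)
        then (PySem.Set.add st.1 e.2, true) else st) (v, b)).1, P x := by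
  induction l with
  | nil => intro v b hv x hx; exact hv x hx
  | cons e t iht =>
    intro v b hv x hx
    simp only [List.foldl_cons] at hx
    by_cases hg : (PySem.Set.contains v e.1 && !(PySem.Set.contains v e.2)) = true
    · rw [if_pos hg] at hx
      refine iht (fun p hp => hcl p (List.mem_cons_of_mem _ hp)) _ _ ?_ x hx
      intro y hy
      rcases pvMemAdd.mp hy with h | rfl
      · exact hv y h
      · have he1 : e.1 ∈ v := pvContains.mp ((Bool.and_eq_true _ _).mp hg).1
        exact hcl e List.mem_cons_self (hv e.1 he1)
    · rw [if_neg hg] at hx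
      exact iht (fun p hp => hcl p (List.mem_cons_of_mem _ hp)) _ _ hv x hx

lemma sat_grow (E : List (Char × Char)) :
    ∀ (f : Nat) (vis : PySem.Set Char), vis ⊆ pvSat E f vis := by
  intro f
  induction f with
  | zero => intro vis x hx; exact hx
  | succ f ih =>
    intro vis x hx
    show x ∈ (if (pvPass E vis).2 then pvSat E f (pvPass E vis).1 else (pvPass E vis).1)
    by_cases h : (pvPass E vis).2 = true
    · rw [if_pos h]; exact ih _ (pass_grow E vis false hx)
    · rw [if_neg h]; exact pass_grow E vis false hx

lemma sat_sound (E : List (Char × Char)) (P : Char → Prop)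
    (hcl : ∀ p ∈ E, P p.1 → P p.2) :
    ∀ (f : Nat) (vis : PySem.Set Char), (∀ x ∈ vis, P x) → ∀ x ∈ pvSat E f vis, P x := by
  intro f
  induction f with
  | zero => intro vis hv x hx; exact hv x hx
  | succ f ih =>
    intro vis hv x hx
    have hx' : x ∈ (if (pvPass E vis).2 then pvSat E f (pvPass E vis).1 else (pvPass E vis).1) := hx
    by_cases h : (pvPass E vis).2 = true
    · rw [if_pos h] at hx'
      exact ih _ (fun y hy => pass_sound P E hcl vis false hv y hy) x hx'
    · rw [if_neg h] at hx'
      exact pass_sound P E hcl vis false hv x hx'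

lemma sat_closed (E : List (Char × Char)) :
    ∀ (f : Nat) (vis : PySem.Set Char), pvLeft (pvUnivB E) vis < f →
      ∀ p ∈ E, p.1 ∈ pvSat E f vis → p.2 ∈ pvSat E f vis := by
  intro f
  induction f with
  | zero => intro vis hf; omega
  | succ f ih =>
    intro vis hf p hp hp1
    have hunf : pvSat E (f + 1) vis =
        (if (pvPass E vis).2 then pvSat E f (pvPass E vis).1 else (pvPass E vis).1) := rfl
    by_cases h : (pvPass E vis).2 = true
    · rw [hunf, if_pos h] at hp1 ⊢
      obtain ⟨q, hq, hq1, hq2⟩ := pass_progress E vis h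
      have hmeas : pvLeft (pvUnivB E) (pvPass E vis).1 < f := by
        have hsub : vis ⊆ (pvPass E vis).1 := pass_grow E vis false
        have hqu : q.2 ∈ pvUnivB E :=
          List.mem_append.mpr (Or.inr (List.mem_map.mpr ⟨q, hq, rfl⟩))
        have := pvLeft_strict (pvUnivB E) hsub hqu hq2 hq1
        omega
      exact ih _ hmeas p hp hp1
    · rw [hunf, if_neg h] at hp1 ⊢
      obtain ⟨h1, _, h3⟩ := pass_false E vis false (Bool.eq_false_iff.mpr h)
      rw [show (pvPass E vis).1 = vis from h1] at hp1 ⊢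
      exact h3 p hp hp1

lemma sat_char (E : List (Char × Char)) (s0 : Char) (x : Char) :
    x ∈ pvSat E ((pvUnivB E).length + 1) (PySem.Set.add PySem.Set.empty s0) ↔
      pvReach E s0 x := by
  constructor
  · intro hx
    refine sat_sound E (pvReach E s0) (fun p hp h => Relation.ReflTransGen.tail h hp) _ _ ?_ x hx
    intro y hy
    rcases pvMemAdd.mp hy with h | rfl
    · exact absurd h (by simp)
    · exact Relation.ReflTransGen.refl
  · intro h
    have hcl := sat_closed E ((pvUnivB E).length + 1) (PySem.Set.add PySem.Set.empty s0)
      (Nat.lt_succ_of_le (pvLeft_le _ _))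
    induction h with
    | refl => exact sat_grow E _ _ (pvMemAdd.mpr (Or.inr rfl))
    | tail h1 h2 ih => exact hcl (_, _) h2 ih

-- ===== bridges between the two ports =====
lemma pvFoldSplit (arr : List String) :
    arr.foldl
      (fun (s : PySem.Dict Char (List Char) × PySem.Dict Char Int × PySem.Dict Char Int) word =>
        (PySem.Dict.modify s.1 (pvFirst word) [] (· ++ [pvLast word]),
         PySem.Dict.modify s.2.1 (pvFirst word) 0 (· + 1),
         PySem.Dict.modify s.2.2 (pvLast word) 0 (· + 1)))
      (PySem.Dict.empty, PySem.Dict.empty, PySem.Dict.empty)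
    = (pvGraphOf arr,
       PySem.Dict.counter ((pvEdges arr).map (·.1)),
       PySem.Dict.counter ((pvEdges arr).map (·.2))) := by
  have hsplit : ∀ (a : PySem.Dict Char (List Char)) (b c : PySem.Dict Char Int),
      arr.foldl
        (fun (s : PySem.Dict Char (List Char) × PySem.Dict Char Int × PySem.Dict Char Int) word =>
          (PySem.Dict.modify s.1 (pvFirst word) [] (· ++ [pvLast word]),
           PySem.Dict.modify s.2.1 (pvFirst word) 0 (· + 1),
           PySem.Dict.modify s.2.2 (pvLast word) 0 (· + 1)))
        (a, b, c)
      = (arr.foldl (fun d w => PySem.Dict.modify d (pvFirst w) [] (· ++ [pvLast w])) a,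
         arr.foldl (fun d w => PySem.Dict.modify d (pvFirst w) 0 (· + 1)) b,
         arr.foldl (fun d w => PySem.Dict.modify d (pvLast w) 0 (· + 1)) c) := by
    induction arr with
    | nil => intro a b c; rfl
    | cons w t iht => intro a b c; simp only [List.foldl_cons]; exact iht _ _ _
  rw [hsplit]
  refine congrArg₂ Prod.mk ?_ (congrArg₂ Prod.mk ?_ ?_)
  · unfold pvGraphOf pvEdges
    rw [List.foldl_map]
  · rw [PySem.Dict.counter_eq_foldl]
    unfold pvEdges
    rw [List.map_map, List.foldl_map]
    rfl
  · rw [PySem.Dict.counter_eq_foldl]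
    unfold pvEdges
    rw [List.map_map, List.foldl_map]
    rfl

lemma pvAdj_graph (arr : List String) (a b : Char) :
    b ∈ pvAdj (pvGraphOf arr) a ↔ (a, b) ∈ pvEdges arr := by
  unfold pvAdj pvGraphOf
  rw [PySem.Dict.getD_foldl_modify_append, PySem.Dict.getD_empty]
  simp only [List.nil_append, List.mem_map, List.mem_filter]
  constructor
  · rintro ⟨p, ⟨hp, hpa⟩, rfl⟩
    have : p.1 = a := by simpa using hpa
    rw [← this]
    exact hp
  · intro h
    exact ⟨(a, b), ⟨h, by simp⟩, rfl⟩

lemma pvReach_iff (arr : List String) (s x : Char) :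
    pvReachAdj (pvGraphOf arr) s x ↔ pvReach (pvEdges arr) s x := by
  constructor
  · exact Relation.ReflTransGen.mono (fun a b hab => (pvAdj_graph arr a b).mp hab)
  · exact Relation.ReflTransGen.mono (fun a b hab => (pvAdj_graph arr a b).mpr hab)

lemma pvGraph_keys (arr : List String) :
    (pvGraphOf arr).keys = PySem.Set.ofList ((pvEdges arr).map (·.1)) := by
  unfold pvGraphOf
  rw [PySem.Dict.keys_foldl_modify_key (pvEdges arr) (·.1) [] (fun _ p => (· ++ [p.2]))
    PySem.Dict.empty, PySem.Dict.keys_empty, PySem.Set.update_nil_left]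

lemma pvHeadGetD {α : Type} (x : α) (xs : List α) (d : α) :
    PySem.List.pyGetD (x :: xs) 0 d = x := by
  simp [PySem.List.pyGetD, PySem.List.pyGet?, PySem.List.pyIdx?]

-- degree-balance conditions of A and B agree
lemma pvCond_iff (E : List (Char × Char)) :
    (PySem.Set.union (PySem.Set.ofList (PySem.Dict.keys (PySem.Dict.counter (E.map (·.2)))))
        (PySem.Dict.keys (PySem.Dict.counter (E.map (·.1))))).any
      (fun c => !(PySem.Dict.getD (PySem.Dict.counter (E.map (·.2))) c 0 ==
                  PySem.Dict.getD (PySem.Dict.counter (E.map (·.1))) c 0))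
    = !(pvDictEqInt (PySem.Dict.counter (E.map (·.2))) (PySem.Dict.counter (E.map (·.1)))) := by
  rw [Bool.eq_iff_iff]
  set T := E.map (·.2) with hT
  set S := E.map (·.1) with hS
  have hmemT : ∀ c : Char, c ∈ PySem.Set.ofList (PySem.Dict.keys (PySem.Dict.counter T)) ↔ c ∈ T := by
    intro c
    rw [PySem.Dict.keys_counter, PySem.Set.mem_ofList, PySem.Set.mem_ofList]
  constructor
  · intro h
    obtain ⟨c, hc, hne⟩ := List.any_eq_true.mp h
    rw [PySem.Set.mem_union] at hc
    rw [hmemT] at hc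
    rw [PySem.Dict.keys_counter, PySem.Set.mem_ofList] at hc
    have hne' : T.count c ≠ S.count c := by
      intro he
      rw [PySem.Dict.getD_counter, PySem.Dict.getD_counter, he] at hne
      simp at hne
    simp only [Bool.not_eq_true']
    rw [Bool.eq_false_iff]
    intro heq
    unfold pvDictEqInt at heq
    obtain ⟨hk, hv⟩ := Bool.and_eq_true _ _ |>.mp heq
    have hkiff := (PySem.Set.equal_iff _ _).mp hk
    have hcT : c ∈ T := by
      rcases hc with h | h
      · exact h
      · have : c ∈ (PySem.Dict.counter S).keys := by
          rw [PySem.Dict.keys_counter, PySem.Set.mem_ofList]; exact h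
        have := (hkiff c).mpr this
        rw [PySem.Dict.keys_counter, PySem.Set.mem_ofList] at this
        exact this
    have := List.all_eq_true.mp hv c (by rw [PySem.Dict.keys_counter, PySem.Set.mem_ofList]; exact hcT)
    rw [PySem.Dict.getD_counter, PySem.Dict.getD_counter] at this
    exact hne' (by exact_mod_cast beq_iff_eq.mp this)
  · intro h
    simp only [Bool.not_eq_true'] at h
    by_contra hany
    have hall : ∀ c : Char, c ∈ T ∨ c ∈ S → T.count c = S.count c := by
      intro c hc
      by_contra hne
      apply absurd hany
      simp only [not_not]
      refine List.any_eq_true.mpr ⟨c, ?_, ?_⟩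
      · rw [PySem.Set.mem_union, hmemT, PySem.Dict.keys_counter, PySem.Set.mem_ofList]
        exact hc
      · rw [PySem.Dict.getD_counter, PySem.Dict.getD_counter]
        simp only [Bool.not_eq_eq_eq_not, Bool.not_true, beq_eq_false_iff_ne, ne_eq]
        exact_mod_cast hne
    rw [Bool.eq_false_iff] at h
    apply h
    unfold pvDictEqInt
    rw [Bool.and_eq_true]
    constructor
    · rw [PySem.Set.equal_iff]
      intro x
      rw [PySem.Dict.keys_counter, PySem.Set.mem_ofList,
          PySem.Dict.keys_counter, PySem.Set.mem_ofList]
      constructor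
      · intro hx
        have := hall x (Or.inl hx)
        have hpos : 0 < T.count x := List.count_pos_iff.mpr hx
        rw [this] at hpos
        exact List.count_pos_iff.mp hpos
      · intro hx
        have := hall x (Or.inr hx)
        have hpos : 0 < S.count x := List.count_pos_iff.mpr hx
        rw [← this] at hpos
        exact List.count_pos_iff.mp hpos
    · rw [List.all_eq_true]
      intro c hc
      rw [PySem.Dict.keys_counter, PySem.Set.mem_ofList] at hc
      rw [PySem.Dict.getD_counter, PySem.Dict.getD_counter]
      have := hall c (Or.inl hc)
      exact beq_iff_eq.mpr (by exact_mod_cast this)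

-- ===== VERDICT (by name: the statement is the Claim_ definition above) =====
theorem canBeChained_spec : Claim_equal_canBeChained := by
  unfold Claim_equal_canBeChained
  intro arr _ hpre
  unfold Spec_canBeChained
  obtain ⟨hne, -⟩ := hpre
  rcases arr with _ | ⟨w, t⟩
  · exact absurd rfl hne
  · simp only [canBeChained, canBeChained_alt, pvFoldSplit]
    rw [show List.map (fun w => (pvFirst w, pvLast w)) (w :: t) = pvEdges (w :: t) from rfl,
        pvCond_iff (pvEdges (w :: t)),
        pvHeadGetD w t "",
        show PySem.List.pyGetD (pvEdges (w :: t)) 0 (' ', ' ') = (pvFirst w, pvLast w) from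
          pvHeadGetD _ _ _]
    have hstart : pvFirst w ∈ pvUniv (pvGraphOf (w :: t)) := by
      unfold pvUniv
      refine List.mem_append.mpr (Or.inl ?_)
      rw [pvGraph_keys, PySem.Set.mem_ofList]
      simp [pvEdges]
    have hVW : ∀ x : Char,
        x ∈ pvDfsA (pvGraphOf (w :: t))
              (((pvGraphOf (w :: t)).keys ++ (pvGraphOf (w :: t)).values.flatten).length + 1)
              (pvFirst w) PySem.Set.empty ↔
        x ∈ pvSat (pvEdges (w :: t))
              (((pvEdges (w :: t)).map (·.1) ++ (pvEdges (w :: t)).map (·.2)).length + 1)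
              (PySem.Set.empty.add (pvFirst w)) :=
      fun x => ((dfs_char _ _ hstart x).trans (pvReach_iff (w :: t) (pvFirst w) x)).trans
        (sat_char (pvEdges (w :: t)) (pvFirst w) x).symm
    refine if_congr Iff.rfl rfl (if_congr ?_ rfl rfl)
    rw [PySem.Set.equal_iff, PySem.Set.equal_iff]
    constructor
    · intro h x
      exact (hVW x).symm.trans (h x)
    · intro h x
      exact (hVW x).trans (h x)
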